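-- pv_equiv track=rewrite | github.com/blackjack94/JVN | rcm.py | RCM
-- ===== SOURCE A (Python) =====
-- def ordered_vertices_of(graph):
--     vertices_with_degree = {}
--
--     for v in range(len(graph)):
--         degree = 0
--         for i in range(len(graph[v])):
--             if graph[v][i] == 1:
--                 degree += 1
--         vertices_with_degree[v+1] = degree
--
--     vertices = sorted(vertices_with_degree.items(), key=lambda v: v[1])
--     return [v for (v, _) in vertices]
--
-- def adjacent_vertices_of(vertice, graph, ordered_vertices):
--     vertice_data = graph[vertice-1]
--
--     adjacent_vertices = []
--     for v in range(len(vertice_data)):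
--         if vertice_data[v] == 1:
--             adjacent_vertices.append(v+1)
--
--     return [v for v in ordered_vertices if v in adjacent_vertices]
--
-- def RCM(graph_matrix):
--     queue = []
--     R = []
--     ordered_vertices = ordered_vertices_of(graph_matrix)
--
--     while len(R) < len(graph_matrix):
--         P = ordered_vertices.pop(0)
--         R.append(P)
--         P_adjacent_vertices = adjacent_vertices_of(P, graph_matrix,
--                                                    ordered_vertices)
--         queue.extend(P_adjacent_vertices)
--
--         while len(queue) != 0:
--             C = queue.pop(0)
--             if C not in R:
--                 R.append(C)
--                 C_adjacent_vertices = adjacent_vertices_of(C, graph_matrix,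
--                                                            ordered_vertices)
--                 queue.extend([v for v in C_adjacent_vertices if v not in R])
--
--     return R[::-1]
-- ===== SOURCE B (Python) =====
-- def RCM(graph_matrix):
--     n = len(graph_matrix)
--     order = sorted(range(1, n + 1), key=lambda v: graph_matrix[v - 1].count(1))
--     adjsets = [{j + 1 for j, x in enumerate(row) if x == 1} for row in graph_matrix]
--     nbrs = [[u for u in order if u in s] for s in adjsets]
--     out = []
--     visited = set()
--     k = 0
--     while len(out) < n:
--         frontier = [order[k]]
--         k += 1
--         while frontier:
--             visited.update(frontier)
--             out.extend(frontier)
--             nxt = []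
--             for u in frontier:
--                 for w in nbrs[u - 1]:
--                     if w not in visited and w not in nxt:
--                         nxt.append(w)
--             frontier = nxt
--     return out[::-1]
-- ===== Notes on version B (the rewrite author's own statement) =====
-- stated objective: alternative
-- what changed: B replaces A's FIFO-queue BFS with per-pop adjacency rescans and list membership tests by a level-synchronized frontier sweep: adjacency sets and degree-ordered neighbour lists are built once, then whole frontiers are expanded level by level with a visited set and no queue at all.
import Mathlib
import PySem

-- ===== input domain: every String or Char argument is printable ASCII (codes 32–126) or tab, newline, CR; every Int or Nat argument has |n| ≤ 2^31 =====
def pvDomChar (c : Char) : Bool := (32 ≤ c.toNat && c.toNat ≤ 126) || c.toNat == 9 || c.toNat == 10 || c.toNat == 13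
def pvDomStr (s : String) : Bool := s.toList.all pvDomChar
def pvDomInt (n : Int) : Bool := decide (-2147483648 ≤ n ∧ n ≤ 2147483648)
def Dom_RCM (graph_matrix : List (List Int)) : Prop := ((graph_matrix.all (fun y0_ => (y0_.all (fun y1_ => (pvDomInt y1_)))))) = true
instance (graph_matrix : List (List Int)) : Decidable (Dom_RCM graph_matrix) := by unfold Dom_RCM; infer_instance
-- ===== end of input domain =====

-- B replaces A's FIFO-queue BFS (per-pop adjacency rescans and list membership tests)
-- by a level-synchronized frontier sweep over neighbour lists and adjacency sets
-- precomputed once (objective: alternative algorithm, same result).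

-- ===== PORT A =====
-- degree loop of ordered_vertices_of
def pvDegLoop (row : List Int) : Int :=
  (PySem.List.pyRange 0 (row.length : Int)).foldl
    (fun degree i => if PySem.List.pyGetD row i 0 == 1 then degree + 1 else degree) 0

def ordered_vertices_of (graph : List (List Int)) : List Int :=
  let vwd : PySem.Dict Int Int :=
    (PySem.List.pyRange 0 (graph.length : Int)).foldl
      (fun d v => d.insert (v + 1) (pvDegLoop (PySem.List.pyGetD graph v []))) PySem.Dict.empty
  (PySem.List.sorted vwd.items (fun p => p.2)).map (fun p => p.1)

def adjacent_vertices_of (vertice : Int) (graph : List (List Int)) (ordered_vertices : List Int) :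
    List Int :=
  let vertice_data := PySem.List.pyGetD graph (vertice - 1) []   -- index always in range when reached
  let adjacent :=
    (PySem.List.pyRange 0 (vertice_data.length : Int)).foldl
      (fun acc v => if PySem.List.pyGetD vertice_data v 0 == 1 then acc ++ [v + 1] else acc) []
  ordered_vertices.filter (fun v => adjacent.contains v)

-- inner 'while len(queue) != 0' loop; fuel only makes the recursion total
def pvInnerA (graph : List (List Int)) (ordered : List Int) :
    Nat → List Int → List Int → List Int × List Int
  | 0, R, queue => (R, queue)
  | fuel + 1, R, queue =>
    match queue with
    | [] => (R, [])
    | C :: rest =>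
      if R.contains C then pvInnerA graph ordered fuel R rest
      else
        let R' := R ++ [C]
        let Cn := adjacent_vertices_of C graph ordered
        pvInnerA graph ordered fuel R' (rest ++ Cn.filter (fun v => !R'.contains v))

-- outer 'while len(R) < len(graph_matrix)' loop
def pvOuterA (graph : List (List Int)) (innerFuel : Nat) :
    Nat → List Int → List Int → List Int → List Int
  | 0, _, R, _ => R
  | fuel + 1, ordered, R, queue =>
    if R.length < graph.length then
      match ordered with
      | [] => R   -- Python would raise here; never reached
      | P :: ordered' =>
        let R' := R ++ [P]
        let queue' := queue ++ adjacent_vertices_of P graph ordered'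
        match pvInnerA graph ordered' innerFuel R' queue' with
        | (R'', queue'') => pvOuterA graph innerFuel fuel ordered' R'' queue''
    else R

def RCM (graph_matrix : List (List Int)) : List Int :=
  let n := graph_matrix.length
  let R := pvOuterA graph_matrix (2 * n * n + n + 1) (n + 1) (ordered_vertices_of graph_matrix) [] []
  (PySem.List.slice? R none none (-1)).getD []   -- R[::-1]

-- ===== PORT B =====
-- {j + 1 for j, x in enumerate(row) if x == 1}
def pvAdjSet (row : List Int) : PySem.Set Int :=
  PySem.Set.ofList (((PySem.List.enumerate row 0).filter (fun p => p.2 == 1)).map (fun p => p.1 + 1))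

-- inner 'while frontier:' layer loop of Source B
def pvInnerB (nbrs : List (List Int)) :
    Nat → List Int → PySem.Set Int → List Int → List Int × PySem.Set Int
  | 0, out, visited, _ => (out, visited)
  | fuel + 1, out, visited, frontier =>
    match frontier with
    | [] => (out, visited)
    | _ :: _ =>
      let visited' := PySem.Set.update visited frontier
      let out' := out ++ frontier
      let nxt := frontier.foldl (fun acc u =>
          (PySem.List.pyGetD nbrs (u - 1) []).foldl (fun acc2 w =>
            if !(PySem.Set.contains visited' w) && !(acc2.contains w) then acc2 ++ [w] else acc2)
            acc) []
      pvInnerB nbrs fuel out' visited' nxt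

-- outer 'while len(out) < n' loop of Source B
def pvOuterB (nbrs : List (List Int)) (order : List Int) (n innerFuel : Nat) :
    Nat → Int → List Int → PySem.Set Int → List Int
  | 0, _, out, _ => out
  | fuel + 1, k, out, visited =>
    if out.length < n then
      let frontier := [PySem.List.pyGetD order k 0]
      match pvInnerB nbrs innerFuel out visited frontier with
      | (out', visited') => pvOuterB nbrs order n innerFuel fuel (k + 1) out' visited'
    else out

def RCM_alt (graph_matrix : List (List Int)) : List Int :=
  let n := graph_matrix.length
  let order := PySem.List.sorted (PySem.List.pyRange 1 ((n : Int) + 1))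
      (fun v => ((PySem.List.count (PySem.List.pyGetD graph_matrix (v - 1) []) 1 : Nat) : Int))
  let adjsets := graph_matrix.map pvAdjSet
  let nbrs := adjsets.map (fun s => order.filter (fun u => PySem.Set.contains s u))
  let out := pvOuterB nbrs order n (n + 2) (n + 1) 0 [] PySem.Set.empty
  (PySem.List.slice? out none none (-1)).getD []   -- out[::-1]

-- ===== PRECONDITION & SPEC =====
def Spec_RCM (graph_matrix : List (List Int)) (out : List Int) : Prop := out = RCM_alt graph_matrix
instance (graph_matrix : List (List Int)) (out : List Int) : Decidable (Spec_RCM graph_matrix out) := by unfold Spec_RCM; infer_instance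

-- ===== CLAIM (what is proved, stated in full; the proofs are below) =====
def Claim_equal_RCM : Prop := ∀ (graph_matrix : List (List Int)), Dom_RCM graph_matrix → Spec_RCM graph_matrix (RCM graph_matrix)

-- ===== LEMMAS AND PROOFS =====

-- names for the values RCM_alt binds
def pvDegs (g : List (List Int)) : List Int :=
  g.map (fun row => ((PySem.List.count row 1 : Nat) : Int))
def pvOrder (g : List (List Int)) : List Int :=
  PySem.List.sorted (PySem.List.pyRange 1 ((g.length : Int) + 1))
    (fun v => PySem.List.pyGetD (pvDegs g) (v - 1) 0)
def pvNbrs (g : List (List Int)) : List (List Int) :=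
  g.map (fun row => (pvOrder g).filter (fun u => PySem.Set.contains (pvAdjSet row) u))

theorem pvOrderB_eq (g : List (List Int)) :
    PySem.List.sorted (PySem.List.pyRange 1 ((g.length : Int) + 1))
      (fun v => ((PySem.List.count (PySem.List.pyGetD g (v - 1) []) 1 : Nat) : Int))
      = pvOrder g := by
  unfold pvOrder
  congr 1
  funext v
  have h0 : ((0 : Int)) = ((fun row : List Int => ((PySem.List.count row 1 : Nat) : Int)) []) := by
    simp [PySem.List.count]
  rw [pvDegs, h0, PySem.List.pyGetD_map]

theorem RCM_alt_eq (g : List (List Int)) :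
    RCM_alt g = (PySem.List.slice?
      (pvOuterB (pvNbrs g) (pvOrder g) g.length (g.length + 2) (g.length + 1) 0 [] PySem.Set.empty)
      none none (-1)).getD [] := by
  have h : RCM_alt g = (PySem.List.slice?
      (pvOuterB ((g.map pvAdjSet).map (fun s =>
          (PySem.List.sorted (PySem.List.pyRange 1 ((g.length : Int) + 1))
            (fun v => ((PySem.List.count (PySem.List.pyGetD g (v - 1) []) 1 : Nat) : Int))).filter
            (fun u => PySem.Set.contains s u)))
        (PySem.List.sorted (PySem.List.pyRange 1 ((g.length : Int) + 1))
          (fun v => ((PySem.List.count (PySem.List.pyGetD g (v - 1) []) 1 : Nat) : Int)))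
        g.length (g.length + 2) (g.length + 1) 0 [] PySem.Set.empty)
      none none (-1)).getD [] := rfl
  rw [h, pvOrderB_eq, pvNbrs, List.map_map]
  rfl

theorem pvOrder_perm (g : List (List Int)) :
    (pvOrder g).Perm (PySem.List.pyRange 1 ((g.length : Int) + 1)) := by
  unfold pvOrder
  exact PySem.List.sorted_perm _ _ false

theorem pvOrder_mem {g : List (List Int)} {u : Int} (h : u ∈ pvOrder g) :
    1 ≤ u ∧ u ≤ (g.length : Int) := by
  have hp := (pvOrder_perm g).mem_iff.mp h
  have := PySem.List.mem_pyRange_one.mp hp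
  omega

theorem pvOrder_length (g : List (List Int)) : (pvOrder g).length = g.length := by
  rw [(pvOrder_perm g).length_eq, PySem.List.length_pyRange_one]
  omega

theorem pvItems_foldl_insert {α ν : Type} (key : α → Int) (val : α → ν) (l : List α)
    (h : (l.map key).Nodup) :
    (l.foldl (fun d x => d.insert (key x) (val x)) PySem.Dict.empty).items
      = l.map (fun x => (key x, val x)) := by
  induction l using List.reverseRecOn with
  | nil => rfl
  | append_singleton t a ih =>
    rw [List.map_append] at h
    have ht := h.sublist (List.sublist_append_left _ _)
    have hna : key a ∉ t.map key := by
      have := List.disjoint_of_nodup_append h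
      simpa using fun hx => this hx (by simp)
    rw [List.foldl_append, List.foldl_cons, List.foldl_nil]
    have hkeys : (t.foldl (fun d x => d.insert (key x) (val x)) PySem.Dict.empty).keys
        = t.map key := by
      show List.map (fun x : Int × ν => x.1)
          ((t.foldl (fun d x => d.insert (key x) (val x)) PySem.Dict.empty).items) = t.map key
      rw [ih ht, List.map_map]
      rfl
    have hnc : (t.foldl (fun d x => d.insert (key x) (val x)) PySem.Dict.empty).contains (key a)
        = false := by
      rw [← Bool.not_eq_true, PySem.Dict.contains_iff_mem_keys, hkeys]
      exact hna
    rw [PySem.Dict.items_insert_of_not_contains _ _ hnc, ih ht, List.map_append]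
    rfl

theorem pvInsertByMap {α β : Type} (gf : α → β) (before : β → β → Bool) (x : α) (ys : List α) :
    PySem.List.insertBy before (gf x) (ys.map gf)
      = (PySem.List.insertBy (fun a b => before (gf a) (gf b)) x ys).map gf := by
  induction ys with
  | nil => rfl
  | cons y t ih =>
    simp only [List.map_cons, PySem.List.insertBy]
    split
    · simp
    · simp [ih]

theorem pvSortedMap {α β : Type} (gf : α → β) (key : β → Int) (l : List α) :
    PySem.List.sorted (l.map gf) key
      = (PySem.List.sorted l (fun x => key (gf x))).map gf := by
  rw [PySem.List.sorted_eq_foldl_insertBy, PySem.List.sorted_eq_foldl_insertBy, List.foldl_map]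
  suffices hgen : ∀ (acc : List α),
      l.foldl (fun acc x => PySem.List.insertBy (fun a b => decide (key a < key b)) (gf x) acc)
        (acc.map gf)
      = (l.foldl (fun acc x =>
          PySem.List.insertBy (fun a b => decide (key (gf a) < key (gf b))) x acc) acc).map gf by
    simpa using hgen []
  induction l with
  | nil => intro acc; rfl
  | cons x t ih =>
    intro acc
    simp only [List.foldl_cons]
    rw [pvInsertByMap gf (fun a b => decide (key a < key b)) x acc]
    exact ih _

theorem pvDegLoop_eq (row : List Int) : pvDegLoop row = ((row.count 1 : Nat) : Int) := by
  unfold pvDegLoop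
  rw [PySem.List.foldl_if_add_one]
  have hrow : List.map (fun j => PySem.List.pyGetD row j 0) (PySem.List.pyRange 0 (row.length : Int))
      = row := by
    simpa [PySem.List.len] using PySem.List.map_pyGetD_pyRange_zero row 0
  have : row.count 1 = List.countP (fun i => PySem.List.pyGetD row i 0 == 1)
      (PySem.List.pyRange 0 (row.length : Int)) := by
    conv_lhs => rw [← hrow]
    rw [List.count, List.countP_map]
    rfl
  rw [← this]
  simp

theorem pvRangeShift (n : Nat) :
    PySem.List.pyRange 1 ((n : Int) + 1) = (PySem.List.pyRange 0 (n : Int)).map (· + 1) := by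
  induction n with
  | zero => rfl
  | succ m ih =>
    have hc : ((m + 1 : Nat) : Int) + 1 = ((m : Int) + 1) + 1 := by push_cast; ring
    have hc2 : ((m + 1 : Nat) : Int) = (m : Int) + 1 := by push_cast; ring
    rw [hc, PySem.List.pyRange_one_succ_right (show (1 : Int) ≤ (m : Int) + 1 by omega)]
    conv_rhs => rw [hc2, PySem.List.pyRange_one_succ_right (show (0 : Int) ≤ (m : Int) by omega)]
    rw [List.map_append, ih]
    simp

theorem pvOrder_eq_ordered (g : List (List Int)) : ordered_vertices_of g = pvOrder g := by
  show (PySem.List.sorted ((PySem.List.pyRange 0 (g.length : Int)).foldl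
      (fun d v => d.insert (v + 1) (pvDegLoop (PySem.List.pyGetD g v []))) PySem.Dict.empty).items
      (fun p => p.2)).map (fun p => p.1) = pvOrder g
  have hitems : ((PySem.List.pyRange 0 (g.length : Int)).foldl
      (fun d v => d.insert (v + 1) (pvDegLoop (PySem.List.pyGetD g v []))) PySem.Dict.empty).items
      = (PySem.List.pyRange 0 (g.length : Int)).map
          (fun v => (v + 1, pvDegLoop (PySem.List.pyGetD g v []))) := by
    refine pvItems_foldl_insert (fun v => v + 1) (fun v => pvDegLoop (PySem.List.pyGetD g v [])) _ ?_
    exact (PySem.List.nodup_pyRange_one 0 _).map (fun a b h => by omega)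
  rw [hitems]
  have hd : (fun v : Int => (v + 1, pvDegLoop (PySem.List.pyGetD g v [])))
      = (fun v : Int => (v + 1, PySem.List.pyGetD (pvDegs g) v 0)) := by
    funext v
    have h0 : ((0 : Int)) = ((fun row : List Int => ((PySem.List.count row 1 : Nat) : Int)) []) := by
      simp [PySem.List.count]
    have := PySem.List.pyGetD_map (fun row : List Int => ((PySem.List.count row 1 : Nat) : Int))
      g v []
    rw [pvDegs, show (0 : Int) = ((fun row : List Int => ((PySem.List.count row 1 : Nat) : Int)) [])
      from h0, this, pvDegLoop_eq]
    rfl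
  rw [hd, pvSortedMap (fun v : Int => (v + 1, PySem.List.pyGetD (pvDegs g) v 0)) (fun p => p.2),
    List.map_map]
  rw [pvOrder, pvRangeShift, pvSortedMap ((· + 1) : Int → Int)]
  have h1 : ((fun p : Int × Int => p.1) ∘ fun v : Int => (v + 1, PySem.List.pyGetD (pvDegs g) v 0))
      = (· + 1) := by funext v; rfl
  rw [h1]
  have hkey : (fun x : Int => PySem.List.pyGetD (pvDegs g) (x + 1 - 1) 0)
      = (fun x : Int => ((x + 1, PySem.List.pyGetD (pvDegs g) x 0) : Int × Int).2) := by
    funext x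
    have hx : x + 1 - 1 = x := by ring
    rw [hx]
  rw [hkey]

theorem pvSlice_rev (R : List Int) : (PySem.List.slice? R none none (-1)).getD [] = R.reverse := by
  simp [pysem]

theorem pvContainsAppend (R : List Int) (C u : Int) :
    (R ++ [C]).contains u = (R.contains u || u == C) := by
  rw [List.contains_append]
  simp [beq_eq_decide]

theorem pvContainsAdd (s : PySem.Set Int) (x u : Int) :
    PySem.Set.contains (PySem.Set.add s x) u = (PySem.Set.contains s u || u == x) := by
  unfold PySem.Set.add
  by_cases h : PySem.Set.contains s x
  · rw [if_pos h]
    by_cases hux : u = x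
    · subst hux
      rw [h]
      simp
    · simp [hux]
  · rw [if_neg h]
    show List.contains (s ++ [x]) u = (List.contains s u || u == x)
    exact pvContainsAppend s x u

theorem pvContainsUpdate (fr : List Int) :
    ∀ (s : PySem.Set Int) (R : List Int),
    (∀ u, PySem.Set.contains s u = R.contains u) →
    ∀ u, PySem.Set.contains (PySem.Set.update s fr) u = (R ++ fr).contains u := by
  induction fr with
  | nil => intro s R h u; simpa [PySem.Set.update] using h u
  | cons x t ih =>
    intro s R h u
    have hstep : ∀ v, PySem.Set.contains (PySem.Set.add s x) v = (R ++ [x]).contains v := by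
      intro v
      rw [pvContainsAdd, h v, pvContainsAppend]
    have := ih (PySem.Set.add s x) (R ++ [x]) hstep u
    rw [show PySem.Set.update s (x :: t) = PySem.Set.update (PySem.Set.add s x) t from rfl, this]
    simp

-- B's within-layer accumulator loop, as a named function
def pvNf (V : Int → Bool) (acc xs : List Int) : List Int :=
  xs.foldl (fun acc2 w => if !(V w) && !(acc2.contains w) then acc2 ++ [w] else acc2) acc

-- one batch of A's queue: state (R, news, enqueued)
def pvBatch (g : List (List Int)) (o : List Int)
    (st : List Int × List Int × List Int) (q : List Int) : List Int × List Int × List Int :=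
  q.foldl (fun st C =>
    if st.1.contains C then st
    else (st.1 ++ [C], st.2.1 ++ [C],
      st.2.2 ++ (adjacent_vertices_of C g o).filter (fun v => !(st.1 ++ [C]).contains v))) st

def pvBnew (g : List (List Int)) (o R q : List Int) : List Int :=
  (pvBatch g o (R, [], []) q).2.1
def pvBq (g : List (List Int)) (o R q : List Int) : List Int :=
  (pvBatch g o (R, [], []) q).2.2

theorem pvInnerA_nil (g : List (List Int)) (o : List Int) (f : Nat) (R : List Int) :
    pvInnerA g o f R [] = (R, []) := by
  cases f <;> rfl

theorem pvBatch_cons (g : List (List Int)) (o : List Int)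
    (st : List Int × List Int × List Int) (C : Int) (t : List Int) :
    pvBatch g o st (C :: t)
      = pvBatch g o (if st.1.contains C then st
          else (st.1 ++ [C], st.2.1 ++ [C],
            st.2.2 ++ (adjacent_vertices_of C g o).filter (fun v => !(st.1 ++ [C]).contains v))) t
      := rfl

theorem pvBatch_shift (g : List (List Int)) (o : List Int) (q : List Int) :
    ∀ R news E, pvBatch g o (R, news, E) q
      = ((pvBatch g o (R, [], []) q).1,
         news ++ (pvBatch g o (R, [], []) q).2.1,
         E ++ (pvBatch g o (R, [], []) q).2.2) := by
  induction q with
  | nil => intro R news E; simp [pvBatch]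
  | cons C t ih =>
    intro R news E
    rw [pvBatch_cons, pvBatch_cons]
    by_cases h : R.contains C
    · simp only [h, if_true]
      exact ih R news E
    · simp only [h, Bool.false_eq_true, if_false]
      rw [ih (R ++ [C]) (news ++ [C]) (E ++ _), ih (R ++ [C]) ([] ++ [C]) ([] ++ _)]
      simp

theorem pvBnew_skip {g : List (List Int)} {o R : List Int} {C : Int} (h : R.contains C = true)
    (t : List Int) : pvBnew g o R (C :: t) = pvBnew g o R t := by
  unfold pvBnew
  rw [pvBatch_cons]
  simp only [h, if_true]

theorem pvBnew_cons {g : List (List Int)} {o R : List Int} {C : Int} (h : R.contains C = false)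
    (t : List Int) : pvBnew g o R (C :: t) = C :: pvBnew g o (R ++ [C]) t := by
  unfold pvBnew
  rw [pvBatch_cons]
  simp only [h, Bool.false_eq_true, if_false]
  rw [pvBatch_shift]
  simp

theorem pvBq_skip {g : List (List Int)} {o R : List Int} {C : Int} (h : R.contains C = true)
    (t : List Int) : pvBq g o R (C :: t) = pvBq g o R t := by
  unfold pvBq
  rw [pvBatch_cons]
  simp only [h, if_true]

theorem pvBq_cons {g : List (List Int)} {o R : List Int} {C : Int} (h : R.contains C = false)
    (t : List Int) :
    pvBq g o R (C :: t)
      = (adjacent_vertices_of C g o).filter (fun v => !(R ++ [C]).contains v)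
          ++ pvBq g o (R ++ [C]) t := by
  unfold pvBq
  rw [pvBatch_cons]
  simp only [h, Bool.false_eq_true, if_false]
  rw [pvBatch_shift]
  simp

theorem pvBatch1_eq (g : List (List Int)) (o : List Int) (q : List Int) :
    ∀ R, (pvBatch g o (R, [], []) q).1 = R ++ pvBnew g o R q := by
  induction q with
  | nil => intro R; simp [pvBatch, pvBnew]
  | cons C t ih =>
    intro R
    by_cases h : R.contains C
    · rw [pvBnew_skip h]
      rw [pvBatch_cons]
      simp only [h, if_true]
      exact ih R
    · have h' : R.contains C = false := by simpa using h
      rw [pvBnew_cons h']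
      rw [pvBatch_cons]
      simp only [h, Bool.false_eq_true, if_false]
      rw [pvBatch_shift, ih (R ++ [C])]
      simp [pvBnew]

theorem pvInnerA_cons (g : List (List Int)) (o : List Int) (f : Nat) (R : List Int)
    (C : Int) (rest : List Int) :
    pvInnerA g o (f + 1) R (C :: rest)
      = if R.contains C then pvInnerA g o f R rest
        else pvInnerA g o f (R ++ [C])
          (rest ++ (adjacent_vertices_of C g o).filter (fun v => !(R ++ [C]).contains v)) := rfl

-- one batch of A's inner loop, as |q| unfoldings of pvInnerA
theorem pvBatchA (g : List (List Int)) (o : List Int) (q : List Int) :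
    ∀ (f : Nat) (R d E : List Int),
    pvInnerA g o (q.length + f) R (q ++ (d ++ E))
      = pvInnerA g o f (pvBatch g o (R, [], []) q).1 (d ++ (E ++ pvBq g o R q)) := by
  induction q with
  | nil =>
    intro f R d E
    simp [pvBatch, pvBq]
  | cons C t ih =>
    intro f R d E
    have hl : (C :: t).length + f = (t.length + f) + 1 := by simp [List.length_cons]; omega
    rw [hl, show (C :: t) ++ (d ++ E) = C :: (t ++ (d ++ E)) from rfl]
    by_cases h : R.contains C
    · rw [pvInnerA_cons, if_pos h]
      rw [ih f R d E, pvBq_skip h, pvBatch_cons]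
      simp only [h, if_true]
    · have h' : R.contains C = false := by simpa using h
      rw [pvInnerA_cons, if_neg (by rw [h']; exact Bool.false_ne_true)]
      rw [show (t ++ (d ++ E)) ++ (adjacent_vertices_of C g o).filter
            (fun v => !(R ++ [C]).contains v)
          = t ++ (d ++ (E ++ (adjacent_vertices_of C g o).filter
            (fun v => !(R ++ [C]).contains v))) from by simp]
      rw [ih f (R ++ [C]) d (E ++ _), pvBq_cons h', pvBatch_cons]
      simp only [h', Bool.false_eq_true, if_false]
      conv_rhs => rw [pvBatch_shift]
      simp [List.append_assoc]

theorem pvBatchA0 (g : List (List Int)) (o : List Int) (q : List Int) (f : Nat) (R : List Int) :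
    pvInnerA g o (q.length + f) R q
      = pvInnerA g o f (R ++ pvBnew g o R q) (pvBq g o R q) := by
  have h := pvBatchA g o q f R [] []
  rw [pvBatch1_eq] at h
  simpa using h

theorem pvNf_cons (V : Int → Bool) (acc : List Int) (w : Int) (xs : List Int) :
    pvNf V acc (w :: xs)
      = pvNf V (if !(V w) && !(acc.contains w) then acc ++ [w] else acc) xs := rfl

theorem pvNf_append (V : Int → Bool) (acc xs ys : List Int) :
    pvNf V acc (xs ++ ys) = pvNf V (pvNf V acc xs) ys := by
  simp [pvNf]

theorem pvNf_all (V : Int → Bool) (xs : List Int) :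
    ∀ acc, (∀ w ∈ xs, V w = true) → pvNf V acc xs = acc := by
  induction xs with
  | nil => intro acc _; rfl
  | cons w t ih =>
    intro acc h
    rw [pvNf_cons, show (!(V w) && !(acc.contains w)) = false from by
      simp [h w List.mem_cons_self]]
    simp only [Bool.false_eq_true, if_false]
    exact ih acc (fun x hx => h x (List.mem_cons_of_mem _ hx))

theorem pvNf_filter (V h : Int → Bool) (xs : List Int) :
    ∀ acc, (∀ w ∈ xs, h w = false → V w = true) →
    pvNf V acc (xs.filter h) = pvNf V acc xs := by
  induction xs with
  | nil => intro acc _; rfl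
  | cons w t ih =>
    intro acc hh
    rw [List.filter_cons]
    by_cases hw : h w
    · rw [if_pos hw, pvNf_cons, pvNf_cons]
      exact ih _ (fun x hx => hh x (List.mem_cons_of_mem _ hx))
    · rw [if_neg hw, pvNf_cons]
      have hv : V w = true := hh w List.mem_cons_self (by simpa using hw)
      rw [show (!(V w) && !(acc.contains w)) = false from by simp [hv]]
      simp only [Bool.false_eq_true, if_false]
      exact ih _ (fun x hx => hh x (List.mem_cons_of_mem _ hx))

theorem pvNf_congr (V W : Int → Bool) (xs : List Int) (h : ∀ w ∈ xs, V w = W w) :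
    ∀ acc, pvNf V acc xs = pvNf W acc xs := by
  induction xs with
  | nil => intro acc; rfl
  | cons w t ih =>
    intro acc
    rw [pvNf_cons, pvNf_cons, h w List.mem_cons_self]
    exact ih (fun x hx => h x (List.mem_cons_of_mem _ hx)) _

theorem pvBnew_nf (g : List (List Int)) (o : List Int) (q : List Int) :
    ∀ R acc, pvNf (fun w => R.contains w) acc q = acc ++ pvBnew g o (R ++ acc) q := by
  induction q with
  | nil =>
    intro R acc
    simp [pvNf, pvBnew, pvBatch]
  | cons C t ih =>
    intro R acc
    rw [pvNf_cons]
    by_cases hR : R.contains C = true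
    · have hra : (R ++ acc).contains C = true := by
        rw [List.contains_append, hR]; rfl
      rw [pvBnew_skip hra, show (!((fun w => R.contains w) C) && !(acc.contains C)) = false from by
        rw [show ((fun w => R.contains w) C) = true from hR]; rfl]
      simp only [Bool.false_eq_true, if_false]
      exact ih R acc
    · have hR' : R.contains C = false := by simpa using hR
      by_cases hA : acc.contains C = true
      · have hra : (R ++ acc).contains C = true := by
          rw [List.contains_append, hA]; simp
        rw [pvBnew_skip hra, show (!((fun w => R.contains w) C) && !(acc.contains C)) = false from by
          rw [hA]; simp]
        simp only [Bool.false_eq_true, if_false]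
        exact ih R acc
      · have hA' : acc.contains C = false := by simpa using hA
        have hra : (R ++ acc).contains C = false := by
          rw [List.contains_append, hR', hA']; rfl
        rw [pvBnew_cons hra, show (!((fun w => R.contains w) C) && !(acc.contains C)) = true from by
          rw [hA', show ((fun w => R.contains w) C) = false from hR']; rfl]
        simp only [if_true]
        rw [ih R (acc ++ [C])]
        simp

theorem pvBnew_eq_nf (g : List (List Int)) (o : List Int) (R q : List Int) :
    pvBnew g o R q = pvNf (fun w => R.contains w) [] q := by
  have h := pvBnew_nf g o q R []
  simpa using h.symm

theorem pvBnew_mem (g : List (List Int)) (o : List Int) (q : List Int) :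
    ∀ R x, x ∈ pvBnew g o R q → x ∈ q ∧ R.contains x = false := by
  induction q with
  | nil =>
    intro R x hx
    simp [pvBnew, pvBatch] at hx
  | cons C t ih =>
    intro R x hx
    by_cases h : R.contains C
    · rw [pvBnew_skip h] at hx
      obtain ⟨h1, h2⟩ := ih R x hx
      exact ⟨List.mem_cons_of_mem _ h1, h2⟩
    · have h' : R.contains C = false := by simpa using h
      rw [pvBnew_cons h'] at hx
      rcases List.mem_cons.mp hx with he | hm
      · subst he
        exact ⟨List.mem_cons_self, h'⟩
      · obtain ⟨h1, h2⟩ := ih (R ++ [C]) x hm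
        rw [List.contains_append] at h2
        exact ⟨List.mem_cons_of_mem _ h1, by
          cases hc : R.contains x
          · rfl
          · rw [hc] at h2; simp at h2⟩

theorem pvBnew_nodup (g : List (List Int)) (o : List Int) (q : List Int) :
    ∀ R, (pvBnew g o R q).Nodup := by
  induction q with
  | nil => intro R; simp [pvBnew, pvBatch]
  | cons C t ih =>
    intro R
    by_cases h : R.contains C
    · rw [pvBnew_skip h]; exact ih R
    · have h' : R.contains C = false := by simpa using h
      rw [pvBnew_cons h']
      refine List.nodup_cons.mpr ⟨fun hm => ?_, ih (R ++ [C])⟩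
      have := (pvBnew_mem g o t (R ++ [C]) C hm).2
      rw [List.contains_append] at this
      simp at this

theorem pvAdj_sub {C : Int} {g : List (List Int)} {o : List Int} {x : Int}
    (hx : x ∈ adjacent_vertices_of C g o) : x ∈ o := by
  unfold adjacent_vertices_of at hx
  exact (List.mem_filter.mp hx).1

theorem pvBq_mem (g : List (List Int)) (o : List Int) (q : List Int) :
    ∀ R x, x ∈ pvBq g o R q → x ∈ o := by
  induction q with
  | nil => intro R x hx; simp [pvBq, pvBatch] at hx
  | cons C t ih =>
    intro R x hx
    by_cases h : R.contains C
    · rw [pvBq_skip h] at hx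
      exact ih R x hx
    · have h' : R.contains C = false := by simpa using h
      rw [pvBq_cons h'] at hx
      rcases List.mem_append.mp hx with hl | hr
      · exact pvAdj_sub (List.mem_filter.mp hl).1
      · exact ih (R ++ [C]) x hr

-- row-membership predicate shared by both adjacency representations
def pvP (row : List Int) (u : Int) : Bool :=
  decide (u - 1 < (row.length : Int)) && (PySem.List.pyGetD row (u - 1) 0 == 1)

theorem pvAdjBuild_contains (row : List Int) (u : Int) (hu : 1 ≤ u) :
    ((PySem.List.pyRange 0 (row.length : Int)).foldl
      (fun acc v => if PySem.List.pyGetD row v 0 == 1 then acc ++ [v + 1] else acc) []).contains u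
    = pvP row u := by
  have hadj : (PySem.List.pyRange 0 (row.length : Int)).foldl
      (fun acc v => if PySem.List.pyGetD row v 0 == 1 then acc ++ [v + 1] else acc) []
      = ((PySem.List.pyRange 0 (row.length : Int)).filter
          (fun v => PySem.List.pyGetD row v 0 == 1)).map (· + 1) := by
    simpa using PySem.List.foldl_append_if (fun v => PySem.List.pyGetD row v 0 == 1)
      (fun v => v + 1) (PySem.List.pyRange 0 (row.length : Int)) []
  rw [hadj]
  by_cases hin : (u - 1 < (row.length : Int)) ∧ (PySem.List.pyGetD row (u - 1) 0 == 1) = true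
  · have hm : u ∈ ((PySem.List.pyRange 0 (row.length : Int)).filter
        (fun v => PySem.List.pyGetD row v 0 == 1)).map (· + 1) := by
      refine List.mem_map.mpr ⟨u - 1, ?_, by ring⟩
      exact List.mem_filter.mpr ⟨PySem.List.mem_pyRange_one.mpr ⟨by omega, hin.1⟩, hin.2⟩
    rw [show ((((PySem.List.pyRange 0 (row.length : Int)).filter
        (fun v => PySem.List.pyGetD row v 0 == 1)).map (· + 1)).contains u) = true from
      List.contains_iff_mem.mpr hm]
    simp [pvP, hin.1, hin.2]
  · have hm : u ∉ ((PySem.List.pyRange 0 (row.length : Int)).filter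
        (fun v => PySem.List.pyGetD row v 0 == 1)).map (· + 1) := by
      intro hmem
      rcases List.mem_map.mp hmem with ⟨v, hv, hveq⟩
      rcases List.mem_filter.mp hv with ⟨hvr, hvp⟩
      rcases PySem.List.mem_pyRange_one.mp hvr with ⟨hv0, hvl⟩
      have hveq' : v = u - 1 := by omega
      subst hveq'
      exact hin ⟨hvl, hvp⟩
    rw [show ((((PySem.List.pyRange 0 (row.length : Int)).filter
        (fun v => PySem.List.pyGetD row v 0 == 1)).map (· + 1)).contains u) = false from
      by rw [← Bool.not_eq_true]; exact fun hc => hm (List.contains_iff_mem.mp hc)]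
    rcases Decidable.not_and_iff_not_or_not.mp hin with h | h
    · simp [pvP, h]
    · simp [pvP, h]

theorem pvAdj_eqFilter (g : List (List Int)) (C : Int) (l : List Int)
    (hl : ∀ v ∈ l, 1 ≤ v) :
    adjacent_vertices_of C g l
      = l.filter (fun v => pvP (PySem.List.pyGetD g (C - 1) []) v) := by
  unfold adjacent_vertices_of
  exact List.filter_congr fun x hx => pvAdjBuild_contains _ x (hl x hx)

theorem pvMemEnumerate (xs : List Int) :
    ∀ (s : Int) (p : Int × Int), p ∈ PySem.List.enumerate xs s
      ↔ ∃ k : Nat, k < xs.length ∧ p = (s + (k : Int), xs.getD k 0) := by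
  induction xs with
  | nil =>
    intro s p
    simp [PySem.List.enumerate_nil]
  | cons x t ih =>
    intro s p
    rw [PySem.List.enumerate_cons, List.mem_cons, ih (s + 1) p]
    constructor
    · rintro (he | ⟨k, hk, hp⟩)
      · exact ⟨0, by simp [he]⟩
      · refine ⟨k + 1, by simpa using hk, ?_⟩
        rw [hp]
        have : s + 1 + (k : Int) = s + ((k + 1 : Nat) : Int) := by push_cast; ring
        simp [this]
    · rintro ⟨k, hk, hp⟩
      match k with
      | 0 => exact Or.inl (by simpa using hp)
      | k + 1 =>
        refine Or.inr ⟨k, by simpa using hk, ?_⟩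
        rw [hp]
        have : s + 1 + (k : Int) = s + ((k + 1 : Nat) : Int) := by push_cast; ring
        simp [this]

theorem pvAdjSet_contains (row : List Int) (u : Int) (hu : 1 ≤ u) :
    PySem.Set.contains (pvAdjSet row) u = pvP row u := by
  have hiff : u ∈ (((PySem.List.enumerate row 0).filter (fun p => p.2 == 1)).map
      (fun p => p.1 + 1)) ↔ pvP row u = true := by
    constructor
    · intro hm
      obtain ⟨p, hpmem, hpe⟩ := List.mem_map.mp hm
      obtain ⟨hpen, hp1⟩ := List.mem_filter.mp hpmem
      obtain ⟨k, hk, hpk⟩ := (pvMemEnumerate row 0 p).mp hpen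
      subst hpk
      simp only at hp1 hpe
      have hu1 : u - 1 = (k : Int) := by omega
      have hget : PySem.List.pyGetD row (u - 1) 0 = row.getD k 0 := by
        rw [hu1]
        rw [PySem.List.pyGetD_natCast]
      rw [pvP, hget, show decide (u - 1 < (row.length : Int)) = true from by
        rw [hu1]; simp [hk], hp1]
      rfl
    · intro hp
      rw [pvP, Bool.and_eq_true] at hp
      obtain ⟨hlt, heq⟩ := hp
      have hlt' : u - 1 < (row.length : Int) := of_decide_eq_true hlt
      set k : Nat := (u - 1).toNat with hkdef
      have hk : k < row.length := by omega
      refine List.mem_map.mpr ⟨(0 + (k : Int), row.getD k 0), ?_, ?_⟩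
      · refine List.mem_filter.mpr ⟨(pvMemEnumerate row 0 _).mpr ⟨k, hk, rfl⟩, ?_⟩
        have hget : PySem.List.pyGetD row (u - 1) 0 = row.getD k 0 := by
          rw [show u - 1 = (k : Int) from by omega, PySem.List.pyGetD_natCast]
        simpa [hget] using heq
      · simp only
        omega
  cases hc : PySem.Set.contains (pvAdjSet row) u
  · cases hq : pvP row u
    · rfl
    · exfalso
      have hm := hiff.mpr hq
      have : PySem.Set.contains (pvAdjSet row) u = true := by
        unfold pvAdjSet
        exact List.contains_iff_mem.mpr ((PySem.Set.mem_ofList _ _).mpr hm)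
      rw [hc] at this
      exact Bool.false_ne_true this
  · have hm : u ∈ pvAdjSet row := List.contains_iff_mem.mp hc
    have := hiff.mp ((PySem.Set.mem_ofList _ _).mp hm)
    rw [this]

theorem pvNbrs_getD (g : List (List Int)) (C : Int) :
    PySem.List.pyGetD (pvNbrs g) (C - 1) []
      = (pvOrder g).filter (fun u =>
          PySem.Set.contains (pvAdjSet (PySem.List.pyGetD g (C - 1) [])) u) := by
  have hnil : (pvOrder g).filter (fun u =>
      PySem.Set.contains (pvAdjSet ([] : List Int)) u) = [] := by
    refine List.filter_eq_nil_iff.mpr ?_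
    intro u hu
    simp [pvAdjSet, PySem.Set.ofList, PySem.List.enumerate_nil]
  conv_lhs => rw [pvNbrs, show ([] : List Int) = (fun row : List Int => (pvOrder g).filter
      (fun u => PySem.Set.contains (pvAdjSet row) u)) ([] : List Int) from hnil.symm]
  exact PySem.List.pyGetD_map _ g (C - 1) []

-- counting not-yet-visited vertices
def pvUnvis (l R : List Int) : Nat := (l.filter (fun v => !R.contains v)).length

theorem pvUnvis_append (l R fr : List Int) (hnd : fr.Nodup)
    (hmem : ∀ x ∈ fr, x ∈ l ∧ R.contains x = false) :
    pvUnvis l (R ++ fr) + fr.length ≤ pvUnvis l R := by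
  have hsplit : l.filter (fun v => !(R ++ fr).contains v)
      = (l.filter (fun v => !R.contains v)).filter (fun v => !fr.contains v) := by
    rw [List.filter_filter]
    refine List.filter_congr fun x _ => ?_
    rw [List.contains_append]
    simp [Bool.and_comm]
  set l' := l.filter (fun v => !R.contains v) with hl'
  have hfr_sub : fr ⊆ l'.filter (fun v => fr.contains v) := by
    intro x hx
    obtain ⟨hxl, hxR⟩ := hmem x hx
    refine List.mem_filter.mpr ⟨List.mem_filter.mpr ⟨hxl, by rw [hxR]; rfl⟩, ?_⟩
    exact List.contains_iff_mem.mpr hx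
  have h1 : fr.length ≤ (l'.filter (fun v => fr.contains v)).length :=
    (hnd.subperm hfr_sub).length_le
  have h2 : l'.length = (l'.filter (fun v => fr.contains v)).length
      + (l'.filter (fun v => !fr.contains v)).length :=
    List.length_eq_length_filter_add _
  rw [pvUnvis, pvUnvis, hsplit, ← hl']
  omega

theorem pvBq_len (g : List (List Int)) (o : List Int) (q : List Int) :
    ∀ R, (pvBq g o R q).length ≤ (pvBnew g o R q).length * o.length := by
  induction q with
  | nil => intro R; simp [pvBq, pvBnew, pvBatch]
  | cons C t ih =>
    intro R
    by_cases h : R.contains C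
    · rw [pvBq_skip h, pvBnew_skip h]
      exact ih R
    · have h' : R.contains C = false := by simpa using h
      rw [pvBq_cons h', pvBnew_cons h']
      have hblk : ((adjacent_vertices_of C g o).filter
          (fun v => !(R ++ [C]).contains v)).length ≤ o.length := by
        calc ((adjacent_vertices_of C g o).filter (fun v => !(R ++ [C]).contains v)).length
            ≤ (adjacent_vertices_of C g o).length := List.length_filter_le _ _
          _ ≤ o.length := by unfold adjacent_vertices_of; exact List.length_filter_le _ _
      have hih := ih (R ++ [C])
      rw [List.length_append, List.length_cons, Nat.succ_mul]
      omega

theorem pvBq_nil_of_bnew_nil (g : List (List Int)) (o : List Int) (q : List Int) :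
    ∀ R, pvBnew g o R q = [] → pvBq g o R q = [] := by
  induction q with
  | nil => intro R _; simp [pvBq, pvBatch]
  | cons C t ih =>
    intro R hb
    by_cases h : R.contains C
    · rw [pvBq_skip h]
      rw [pvBnew_skip h] at hb
      exact ih R hb
    · have h' : R.contains C = false := by simpa using h
      rw [pvBnew_cons h'] at hb
      exact absurd hb (List.cons_ne_nil _ _)

theorem pvInnerB_consEq (nbrs : List (List Int)) (fB : Nat) (out : List Int)
    (visited : PySem.Set Int) (f0 : Int) (ft : List Int) :
    pvInnerB nbrs (fB + 1) out visited (f0 :: ft)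
      = pvInnerB nbrs fB (out ++ (f0 :: ft)) (PySem.Set.update visited (f0 :: ft))
          ((f0 :: ft).foldl (fun acc u =>
            pvNf (fun w => PySem.Set.contains (PySem.Set.update visited (f0 :: ft)) w) acc
              (PySem.List.pyGetD nbrs (u - 1) [])) []) := rfl

-- nxt of one B layer equals the new elements of the next A batch
theorem pvCore (g : List (List Int)) (kk : Nat) (q : List Int) :
    ∀ (Rc acc : List Int) (V : Int → Bool),
    (∀ w, (Rc ++ pvBnew g ((pvOrder g).drop kk) Rc q).contains w = true → V w = true) →
    (∀ w ∈ (pvOrder g).take kk, V w = true) →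
    pvNf V acc (pvBq g ((pvOrder g).drop kk) Rc q)
      = (pvBnew g ((pvOrder g).drop kk) Rc q).foldl
          (fun a u => pvNf V a (PySem.List.pyGetD (pvNbrs g) (u - 1) [])) acc := by
  induction q with
  | nil => intro Rc acc V _ _; simp [pvBq, pvBnew, pvBatch, pvNf]
  | cons C t ih =>
    intro Rc acc V hfin htake
    by_cases h : Rc.contains C
    · rw [pvBq_skip h, pvBnew_skip h]
      rw [pvBnew_skip h] at hfin
      exact ih Rc acc V hfin htake
    · have h' : Rc.contains C = false := by simpa using h
      rw [pvBq_cons h', pvBnew_cons h']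
      rw [pvBnew_cons h'] at hfin
      have hfin' : ∀ w, ((Rc ++ [C]) ++ pvBnew g ((pvOrder g).drop kk) (Rc ++ [C]) t).contains w
          = true → V w = true := by
        intro w hw
        refine hfin w ?_
        rw [List.contains_iff_mem] at hw ⊢
        simpa using (by simpa using hw)
      have hsub : ∀ w, (Rc ++ [C]).contains w = true → V w = true := by
        intro w hw
        refine hfin' w ?_
        rw [List.contains_iff_mem] at hw ⊢
        exact List.mem_append_left _ hw
      set row := PySem.List.pyGetD g (C - 1) [] with hrow
      have hblk : pvNf V acc ((adjacent_vertices_of C g ((pvOrder g).drop kk)).filter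
            (fun v => !(Rc ++ [C]).contains v))
          = pvNf V acc (PySem.List.pyGetD (pvNbrs g) (C - 1) []) := by
        rw [pvNf_filter V _ _ acc (fun w _ hwf => hsub w (by
          cases hc : (Rc ++ [C]).contains w
          · rw [hc] at hwf; simp at hwf
          · rfl))]
        rw [pvAdj_eqFilter g C _ (fun v hv => (pvOrder_mem (List.mem_of_mem_drop hv)).1), ← hrow]
        have hsplit : (pvOrder g).filter (fun v => pvP row v)
            = ((pvOrder g).take kk).filter (fun v => pvP row v)
              ++ ((pvOrder g).drop kk).filter (fun v => pvP row v) := by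
          conv_lhs => rw [← List.take_append_drop kk (pvOrder g)]
          exact List.filter_append _ _
        have htk : pvNf V acc (((pvOrder g).take kk).filter (fun v => pvP row v)) = acc :=
          pvNf_all V _ acc (fun w hw => htake w (List.mem_of_mem_filter hw))
        have hord : pvNf V acc ((pvOrder g).filter (fun v => pvP row v))
            = pvNf V acc (((pvOrder g).drop kk).filter (fun v => pvP row v)) := by
          rw [hsplit, pvNf_append, htk]
        rw [← hord]
        rw [pvNbrs_getD g C, ← hrow]
        refine (pvNf_congr V V _ (fun w _ => rfl) acc).trans ?_
        congr 1
        refine (List.filter_congr fun u hu => ?_)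
        exact (pvAdjSet_contains row u (pvOrder_mem hu).1).symm
      rw [pvNf_append, hblk, List.foldl_cons]
      exact ih (Rc ++ [C]) _ V hfin' htake

-- lock-step simulation of A's queue run by B's layer run
theorem pvSimInner (g : List (List Int)) (kk : Nat) :
    ∀ (fB : Nat) (R q out : List Int) (visited : PySem.Set Int) (frontier : List Int) (fA : Nat),
    out = R →
    (∀ u, PySem.Set.contains visited u = R.contains u) →
    frontier = pvBnew g ((pvOrder g).drop kk) R q →
    (∀ x ∈ q, x ∈ (pvOrder g).drop kk) →
    (∀ w ∈ (pvOrder g).take kk, R.contains w = true) →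
    q.length + pvUnvis ((pvOrder g).drop kk) R * ((pvOrder g).drop kk).length ≤ fA →
    pvUnvis ((pvOrder g).drop kk) R + 1 ≤ fB →
    (pvInnerB (pvNbrs g) fB out visited frontier).1
        = (pvInnerA g ((pvOrder g).drop kk) fA R q).1
    ∧ (pvInnerA g ((pvOrder g).drop kk) fA R q).2 = []
    ∧ (∀ u, PySem.Set.contains (pvInnerB (pvNbrs g) fB out visited frontier).2 u
        = (pvInnerA g ((pvOrder g).drop kk) fA R q).1.contains u)
    ∧ (∀ w, R.contains w = true
        → (pvInnerA g ((pvOrder g).drop kk) fA R q).1.contains w = true)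
    ∧ R.length ≤ (pvInnerA g ((pvOrder g).drop kk) fA R q).1.length := by
  intro fB
  induction fB with
  | zero =>
    intro R q out visited frontier fA _ _ _ _ _ _ hfB
    omega
  | succ fB ih =>
    intro R q out visited frontier fA h1 h2 h3 h4 h5 hfA hfB
    have hql : q.length ≤ fA := by
      have := hfA; omega
    have hfa2 : fA = q.length + (fA - q.length) := by omega
    have hbatch : pvInnerA g ((pvOrder g).drop kk) fA R q
        = pvInnerA g ((pvOrder g).drop kk) (fA - q.length)
            (R ++ pvBnew g ((pvOrder g).drop kk) R q) (pvBq g ((pvOrder g).drop kk) R q) := by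
      conv_lhs => rw [hfa2]
      exact pvBatchA0 g _ q _ R
    cases hfr : frontier with
    | nil =>
      have hbn : pvBnew g ((pvOrder g).drop kk) R q = [] := by rw [← h3, hfr]
      have hbq : pvBq g ((pvOrder g).drop kk) R q = [] := pvBq_nil_of_bnew_nil g _ q R hbn
      have hA : pvInnerA g ((pvOrder g).drop kk) fA R q = (R, []) := by
        rw [hbatch, hbn, hbq, List.append_nil, pvInnerA_nil]
      rw [hA]
      exact ⟨h1, rfl, h2, fun w hw => hw, le_refl _⟩
    | cons f0 ft =>
      have hbn2 : pvBnew g ((pvOrder g).drop kk) R q = f0 :: ft := by rw [← h3, hfr]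
      have h2' : ∀ u, PySem.Set.contains (PySem.Set.update visited (f0 :: ft)) u
          = (R ++ (f0 :: ft)).contains u := pvContainsUpdate _ visited R h2
      have hfm : ∀ x ∈ (f0 :: ft), x ∈ (pvOrder g).drop kk ∧ R.contains x = false := by
        intro x hx
        have hm := pvBnew_mem g _ q R x (by rw [hbn2]; exact hx)
        exact ⟨h4 x hm.1, hm.2⟩
      have hnd : (f0 :: ft).Nodup := by rw [← hbn2]; exact pvBnew_nodup g _ q R
      have huv : pvUnvis ((pvOrder g).drop kk) (R ++ (f0 :: ft)) + (f0 :: ft).length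
          ≤ pvUnvis ((pvOrder g).drop kk) R := pvUnvis_append _ R _ hnd hfm
      have h3' : (f0 :: ft).foldl (fun acc u =>
            pvNf (fun w => PySem.Set.contains (PySem.Set.update visited (f0 :: ft)) w) acc
              (PySem.List.pyGetD (pvNbrs g) (u - 1) [])) []
          = pvBnew g ((pvOrder g).drop kk) (R ++ (f0 :: ft))
              (pvBq g ((pvOrder g).drop kk) R q) := by
        rw [pvBnew_eq_nf]
        have hcore := pvCore g kk q R []
          (fun w => PySem.Set.contains (PySem.Set.update visited (f0 :: ft)) w)
          (fun w hw => by
            show PySem.Set.contains (PySem.Set.update visited (f0 :: ft)) w = true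
            rw [h2' w, ← hbn2]; exact hw)
          (fun w hw => by
            show PySem.Set.contains (PySem.Set.update visited (f0 :: ft)) w = true
            rw [h2' w, List.contains_iff_mem]
            exact List.mem_append_left _ (List.contains_iff_mem.mp (h5 w hw)))
        calc (f0 :: ft).foldl (fun acc u =>
              pvNf (fun w => PySem.Set.contains (PySem.Set.update visited (f0 :: ft)) w) acc
                (PySem.List.pyGetD (pvNbrs g) (u - 1) [])) []
            = (pvBnew g ((pvOrder g).drop kk) R q).foldl (fun acc u =>
                pvNf (fun w => PySem.Set.contains (PySem.Set.update visited (f0 :: ft)) w) acc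
                  (PySem.List.pyGetD (pvNbrs g) (u - 1) [])) [] := by rw [hbn2]
          _ = pvNf (fun w => PySem.Set.contains (PySem.Set.update visited (f0 :: ft)) w) []
                (pvBq g ((pvOrder g).drop kk) R q) := hcore.symm
          _ = pvNf (fun w => (R ++ (f0 :: ft)).contains w) []
                (pvBq g ((pvOrder g).drop kk) R q) :=
              pvNf_congr _ _ _ (fun w _ => h2' w) []
      have h5' : ∀ w ∈ (pvOrder g).take kk, (R ++ (f0 :: ft)).contains w = true := by
        intro w hw
        rw [List.contains_iff_mem]
        exact List.mem_append_left _ (List.contains_iff_mem.mp (h5 w hw))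
      have h4' : ∀ x ∈ pvBq g ((pvOrder g).drop kk) R q, x ∈ (pvOrder g).drop kk :=
        fun x hx => pvBq_mem g _ q R x hx
      have hbqlen : (pvBq g ((pvOrder g).drop kk) R q).length
          ≤ (f0 :: ft).length * ((pvOrder g).drop kk).length := by
        rw [← hbn2]
        exact pvBq_len g _ q R
      have hfA' : (pvBq g ((pvOrder g).drop kk) R q).length
          + pvUnvis ((pvOrder g).drop kk) (R ++ (f0 :: ft)) * ((pvOrder g).drop kk).length
          ≤ fA - q.length := by
        have hmul : (pvUnvis ((pvOrder g).drop kk) (R ++ (f0 :: ft)) + (f0 :: ft).length)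
              * ((pvOrder g).drop kk).length
            ≤ pvUnvis ((pvOrder g).drop kk) R * ((pvOrder g).drop kk).length :=
          Nat.mul_le_mul_right _ huv
        rw [Nat.add_mul] at hmul
        omega
      have hfB' : pvUnvis ((pvOrder g).drop kk) (R ++ (f0 :: ft)) + 1 ≤ fB := by
        have h1f : 1 ≤ (f0 :: ft).length := by simp
        omega
      have hrec := ih (R ++ (f0 :: ft)) (pvBq g ((pvOrder g).drop kk) R q)
        (out ++ (f0 :: ft)) (PySem.Set.update visited (f0 :: ft))
        ((f0 :: ft).foldl (fun acc u =>
            pvNf (fun w => PySem.Set.contains (PySem.Set.update visited (f0 :: ft)) w) acc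
              (PySem.List.pyGetD (pvNbrs g) (u - 1) [])) [])
        (fA - q.length)
        (by rw [h1]) h2' h3' h4' h5' hfA' hfB'
      rw [pvInnerB_consEq, hbatch, hbn2]
      refine ⟨hrec.1, hrec.2.1, hrec.2.2.1, ?_, ?_⟩
      · intro w hw
        refine hrec.2.2.2.1 w ?_
        rw [List.contains_iff_mem]
        exact List.mem_append_left _ (List.contains_iff_mem.mp hw)
      · have hlen := hrec.2.2.2.2
        rw [List.length_append] at hlen
        omega

theorem pvSimOuter (g : List (List Int)) :
    ∀ (fuel : Nat) (k : Nat) (R out : List Int) (visited : PySem.Set Int),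
    out = R →
    (∀ u, PySem.Set.contains visited u = R.contains u) →
    (∀ w ∈ (pvOrder g).take k, R.contains w = true) →
    k ≤ R.length →
    pvOuterB (pvNbrs g) (pvOrder g) g.length (g.length + 2) fuel ((k : Nat) : Int) out visited
      = pvOuterA g (2 * g.length * g.length + g.length + 1) fuel ((pvOrder g).drop k) R [] := by
  intro fuel
  induction fuel with
  | zero =>
    intro k R out visited h1 _ _ _
    simpa [pvOuterA, pvOuterB] using h1
  | succ fuel ih =>
    intro k R out visited h1 h2 h3 hkR
    by_cases hg : R.length < g.length
    · have hk : k < (pvOrder g).length := by rw [pvOrder_length]; omega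
      have hdropc := List.drop_eq_getElem_cons hk
      set P := (pvOrder g)[k] with hP
      have hPmem : P ∈ pvOrder g := List.getElem_mem hk
      have hPB : PySem.List.pyGetD (pvOrder g) ((k : Nat) : Int) 0 = P := by
        rw [PySem.List.pyGetD_eq_getElem (pvOrder g) 0 (by omega) (by exact_mod_cast hk)]
        simp [hP]
      -- unfold one step of the B outer loop
      have hgB : out.length < g.length := by rw [h1]; exact hg
      rw [show pvOuterB (pvNbrs g) (pvOrder g) g.length (g.length + 2) (fuel + 1)
            ((k : Nat) : Int) out visited
          = if out.length < g.length then
              (match pvInnerB (pvNbrs g) (g.length + 2) out visited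
                  [PySem.List.pyGetD (pvOrder g) ((k : Nat) : Int) 0] with
               | (out', visited') => pvOuterB (pvNbrs g) (pvOrder g) g.length (g.length + 2) fuel
                  (((k : Nat) : Int) + 1) out' visited')
            else out from rfl, if_pos hgB, hPB]
      -- unfold one step of the A outer loop
      rw [hdropc]
      rw [show pvOuterA g (2 * g.length * g.length + g.length + 1) (fuel + 1)
            (P :: (pvOrder g).drop (k + 1)) R []
          = if R.length < g.length then
              (match pvInnerA g ((pvOrder g).drop (k + 1))
                  (2 * g.length * g.length + g.length + 1) (R ++ [P])
                  ([] ++ adjacent_vertices_of P g ((pvOrder g).drop (k + 1))) with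
               | (R'', queue'') => pvOuterA g (2 * g.length * g.length + g.length + 1) fuel
                  ((pvOrder g).drop (k + 1)) R'' queue'')
            else R from rfl, if_pos hg]
      -- first B layer = the unconditional outer append of A
      set q1 := adjacent_vertices_of P g ((pvOrder g).drop (k + 1)) with hq1
      set R1 := R ++ [P] with hR1
      set visited1 := PySem.Set.update visited [P] with hv1
      have h2' : ∀ u, PySem.Set.contains visited1 u = R1.contains u :=
        pvContainsUpdate [P] visited R h2
      rw [pvInnerB_consEq]
      set nxt := [P].foldl (fun acc u =>
          pvNf (fun w => PySem.Set.contains visited1 w) acc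
            (PySem.List.pyGetD (pvNbrs g) (u - 1) [])) [] with hnxt
      -- the take (k+1) prefix is inside R1
      have htk1 : ∀ w ∈ (pvOrder g).take (k + 1), R1.contains w = true := by
        intro w hw
        rw [List.take_add_one, List.getElem?_eq_getElem hk] at hw
        rcases List.mem_append.mp hw with hl | hr
        · rw [hR1, List.contains_iff_mem]
          exact List.mem_append_left _ (List.contains_iff_mem.mp (h3 w hl))
        · have hwP : w = P := by simpa using hr
          subst hwP
          rw [hR1, List.contains_iff_mem]
          exact List.mem_append_right _ (by simp)
      -- frontier invariant for the inner simulation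
      have hfr : nxt = pvBnew g ((pvOrder g).drop (k + 1)) R1 q1 := by
        rw [pvBnew_eq_nf, hnxt, List.foldl_cons, List.foldl_nil]
        have hq1f : q1 = ((pvOrder g).drop (k + 1)).filter
            (fun v => pvP (PySem.List.pyGetD g (P - 1) []) v) := by
          rw [hq1]
          exact pvAdj_eqFilter g P _ (fun v hv => (pvOrder_mem (List.mem_of_mem_drop hv)).1)
        set row := PySem.List.pyGetD g (P - 1) [] with hrow
        have hsplit : (pvOrder g).filter (fun v => pvP row v)
            = ((pvOrder g).take (k + 1)).filter (fun v => pvP row v)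
              ++ ((pvOrder g).drop (k + 1)).filter (fun v => pvP row v) := by
          conv_lhs => rw [← List.take_append_drop (k + 1) (pvOrder g)]
          exact List.filter_append _ _
        have htk : pvNf (fun w => R1.contains w) []
            (((pvOrder g).take (k + 1)).filter (fun v => pvP row v)) = [] :=
          pvNf_all _ _ [] (fun w hw => htk1 w (List.mem_of_mem_filter hw))
        have e1 : pvNf (fun w => R1.contains w) [] ((pvOrder g).filter (fun v => pvP row v))
            = pvNf (fun w => R1.contains w) []
                (((pvOrder g).drop (k + 1)).filter (fun v => pvP row v)) := by
          rw [hsplit, pvNf_append, htk]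
        have e2 : (pvOrder g).filter (fun u => PySem.Set.contains (pvAdjSet row) u)
            = (pvOrder g).filter (fun v => pvP row v) :=
          List.filter_congr fun u hu => pvAdjSet_contains row u (pvOrder_mem hu).1
        calc pvNf (fun w => PySem.Set.contains visited1 w) []
              (PySem.List.pyGetD (pvNbrs g) (P - 1) [])
            = pvNf (fun w => R1.contains w) [] (PySem.List.pyGetD (pvNbrs g) (P - 1) []) :=
              pvNf_congr _ _ _ (fun w _ => h2' w) []
          _ = pvNf (fun w => R1.contains w) []
                ((pvOrder g).filter (fun u => PySem.Set.contains (pvAdjSet row) u)) := by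
              rw [pvNbrs_getD g P, ← hrow]
          _ = pvNf (fun w => R1.contains w) [] ((pvOrder g).filter (fun v => pvP row v)) := by
              rw [e2]
          _ = pvNf (fun w => R1.contains w) []
                (((pvOrder g).drop (k + 1)).filter (fun v => pvP row v)) := e1
          _ = pvNf (fun w => R1.contains w) [] q1 := by rw [← hq1f]
      -- inner simulation
      have hL : ((pvOrder g).drop (k + 1)).length ≤ g.length := by
        rw [List.length_drop, pvOrder_length]
        omega
      have hq1L : q1.length ≤ ((pvOrder g).drop (k + 1)).length := by
        rw [hq1]
        unfold adjacent_vertices_of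
        exact List.length_filter_le _ _
      have huL : pvUnvis ((pvOrder g).drop (k + 1)) R1 ≤ ((pvOrder g).drop (k + 1)).length :=
        List.length_filter_le _ _
      have hfA : q1.length
          + pvUnvis ((pvOrder g).drop (k + 1)) R1 * ((pvOrder g).drop (k + 1)).length
          ≤ 2 * g.length * g.length + g.length + 1 := by
        have hmul : pvUnvis ((pvOrder g).drop (k + 1)) R1 * ((pvOrder g).drop (k + 1)).length
            ≤ g.length * g.length := Nat.mul_le_mul (le_trans huL hL) hL
        have h2n : 2 * g.length * g.length = g.length * g.length + g.length * g.length := by ring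
        omega
      have hfB : pvUnvis ((pvOrder g).drop (k + 1)) R1 + 1 ≤ g.length + 1 := by
        have := le_trans huL hL
        omega
      have hsim := pvSimInner g (k + 1) (g.length + 1) R1 q1 (out ++ [P]) visited1 nxt
        (2 * g.length * g.length + g.length + 1)
        (by rw [h1, hR1]) h2' hfr
        (fun x hx => by rw [hq1] at hx; exact pvAdj_sub hx)
        htk1 hfA hfB
      rcases hIA : pvInnerA g ((pvOrder g).drop (k + 1))
          (2 * g.length * g.length + g.length + 1) R1 ([] ++ q1) with ⟨R2, queue2⟩
      rcases hIB : pvInnerB (pvNbrs g) (g.length + 1) (out ++ [P]) visited1 nxt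
          with ⟨out2, visited2⟩
      rw [List.nil_append] at hIA
      rw [hIA, hIB] at hsim
      simp only at hsim
      obtain ⟨hs1, hs2, hs3, hs4, hs5⟩ := hsim
      simp only
      subst hs2
      have hcast : ((k : Nat) : Int) + 1 = (((k + 1 : Nat)) : Int) := by push_cast; ring
      rw [hcast]
      refine ih (k + 1) R2 out2 visited2 hs1 hs3 ?_ ?_
      · intro w hw
        exact hs4 w (htk1 w hw)
      · have : R1.length = R.length + 1 := by rw [hR1, List.length_append]; rfl
        omega
    · have hgB : ¬ out.length < g.length := by rw [h1]; exact hg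
      rw [show pvOuterB (pvNbrs g) (pvOrder g) g.length (g.length + 2) (fuel + 1)
            ((k : Nat) : Int) out visited
          = if out.length < g.length then
              (match pvInnerB (pvNbrs g) (g.length + 2) out visited
                  [PySem.List.pyGetD (pvOrder g) ((k : Nat) : Int) 0] with
               | (out', visited') => pvOuterB (pvNbrs g) (pvOrder g) g.length (g.length + 2) fuel
                  (((k : Nat) : Int) + 1) out' visited')
            else out from rfl, if_neg hgB]
      cases hdrop : (pvOrder g).drop k with
      | nil =>
        rw [show pvOuterA g (2 * g.length * g.length + g.length + 1) (fuel + 1) [] R []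
            = if R.length < g.length then R else R from rfl]
        simp [h1]
      | cons P t =>
        rw [show pvOuterA g (2 * g.length * g.length + g.length + 1) (fuel + 1) (P :: t) R []
            = if R.length < g.length then
                (match pvInnerA g t (2 * g.length * g.length + g.length + 1) (R ++ [P])
                    ([] ++ adjacent_vertices_of P g t) with
                 | (R'', queue'') => pvOuterA g (2 * g.length * g.length + g.length + 1) fuel
                    t R'' queue'')
              else R from rfl, if_neg hg]
        exact h1

-- ===== VERDICT (by name: the statement is the Claim_ definition above) =====
theorem RCM_spec : Claim_equal_RCM := by
  intro g _
  unfold Spec_RCM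
  show RCM g = RCM_alt g
  rw [show RCM g = (PySem.List.slice?
      (pvOuterA g (2 * g.length * g.length + g.length + 1) (g.length + 1)
        (ordered_vertices_of g) [] []) none none (-1)).getD [] from rfl]
  rw [RCM_alt_eq, pvSlice_rev, pvSlice_rev, pvOrder_eq_ordered]
  congr 1
  have h := pvSimOuter g (g.length + 1) 0 [] [] PySem.Set.empty rfl (fun u => rfl)
    (by simp) (by simp)
  rw [List.drop_zero] at h
  simpa using h.symm
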